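-- pv_equiv track=rewrite | github.com/angsylvest/tom-and-jerry-path-planning | revised_version/risk_assessment.py | sort_into_ranges
-- ===== SOURCE A (Python) =====
-- def sort_into_ranges(angle_degrees):
--     # Define the ranges
--     ranges = [(0, 45), (45, 90), (90, 135), (135, 180),
--             (180, 225), (225, 270), (270, 315), (315, 360)]
--
--     # Iterate through the ranges and find where the angle falls
--     for i, (start, end) in enumerate(ranges):
--         if start <= angle_degrees < end:
--             return i
--
--     # If the angle is 360, include it in the last range
--     if angle_degrees == 360:
--         return len(ranges) - 1
--
--     # If the angle is less than 0, include it in the first range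
--     if angle_degrees < 0:
--         return 0
--
--     return None
-- ===== SOURCE B (Python) =====
-- def sort_into_ranges(angle_degrees):
--     # Closed-form bucket index instead of scanning the eight-entry range table.
--     if 0 <= angle_degrees < 360:
--         return int(angle_degrees // 45)
--     if angle_degrees == 360:
--         return 7
--     if angle_degrees < 0:
--         return 0
--     return None
-- ===== Notes on version B (the rewrite author's own statement) =====
-- stated objective: simpler
-- what changed: Replaces the enumerate-scan over the eight-entry range table with a closed-form arithmetic bucket index angle_degrees // 45.
import Mathlib
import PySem

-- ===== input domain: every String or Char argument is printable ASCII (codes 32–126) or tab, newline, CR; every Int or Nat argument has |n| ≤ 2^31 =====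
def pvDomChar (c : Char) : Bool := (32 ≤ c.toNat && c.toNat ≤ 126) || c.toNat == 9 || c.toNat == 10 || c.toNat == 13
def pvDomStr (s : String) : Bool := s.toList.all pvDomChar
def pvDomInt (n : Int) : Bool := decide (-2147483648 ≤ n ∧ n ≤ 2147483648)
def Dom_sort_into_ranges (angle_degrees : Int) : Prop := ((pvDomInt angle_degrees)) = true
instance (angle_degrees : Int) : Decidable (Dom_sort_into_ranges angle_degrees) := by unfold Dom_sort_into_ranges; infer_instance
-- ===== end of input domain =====

-- B replaces A's scan over the eight-entry range table with a closed-form bucket index (simpler).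

-- ===== PORT A =====
-- the first-match scan of A's for-loop over the enumerated range table
def sort_into_ranges_scan (angle_degrees : Int) : List (Int × Int × Int) → Option Int
  | [] => none
  | (i, start, stop) :: rest =>
      if start ≤ angle_degrees ∧ angle_degrees < stop then some i
      else sort_into_ranges_scan angle_degrees rest

def sort_into_ranges (angle_degrees : Int) : Option Int :=
  let ranges : List (Int × Int × Int) :=
    [(0, 0, 45), (1, 45, 90), (2, 90, 135), (3, 135, 180),
     (4, 180, 225), (5, 225, 270), (6, 270, 315), (7, 315, 360)]
  match sort_into_ranges_scan angle_degrees ranges with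
  | some i => some i
  | none =>
      if angle_degrees = 360 then some 7
      else if angle_degrees < 0 then some 0
      else none

-- ===== PORT B =====
def sort_into_ranges_alt (angle_degrees : Int) : Option Int :=
  if 0 ≤ angle_degrees ∧ angle_degrees < 360 then some (PySem.Int.floordiv angle_degrees 45)
  else if angle_degrees = 360 then some 7
  else if angle_degrees < 0 then some 0
  else none

-- ===== PRECONDITION & SPEC =====
def Spec_sort_into_ranges (angle_degrees : Int) (out : Option Int) : Prop := out = sort_into_ranges_alt angle_degrees
instance (angle_degrees : Int) (out : Option Int) : Decidable (Spec_sort_into_ranges angle_degrees out) := by unfold Spec_sort_into_ranges; infer_instance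

-- ===== CLAIM (what is proved, stated in full; the proofs are below) =====
def Claim_equal_sort_into_ranges : Prop := ∀ (angle_degrees : Int), Dom_sort_into_ranges angle_degrees → Spec_sort_into_ranges angle_degrees (sort_into_ranges angle_degrees)

-- ===== LEMMAS AND PROOFS =====

-- ===== VERDICT (by name: the statement is the Claim_ definition above) =====
theorem sort_into_ranges_spec : Claim_equal_sort_into_ranges := by
  intro a _
  show sort_into_ranges a = sort_into_ranges_alt a
  simp only [sort_into_ranges, sort_into_ranges_alt, sort_into_ranges_scan,
    PySem.Int.floordiv_eq_ediv_of_pos (by omega : (0:Int) < 45)]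
  split_ifs <;> first | rfl | omega | (simp_all; omega)
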